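-- pv_equiv track=rewrite | github.com/yasarkocyigit/agentic-data-engineer | backend/routers/notebook.py | _strip_sql_line_comment
-- ===== SOURCE A (Python) =====
-- def _strip_sql_line_comment(line: str) -> str:
--     """Remove -- comments while preserving quoted strings."""
--     result: list[str] = []
--     i = 0
--     in_single = False
--     in_double = False
--
--     while i < len(line):
--         ch = line[i]
--         nxt = line[i + 1] if i + 1 < len(line) else ""
--
--         if in_single:
--             result.append(ch)
--             if ch == "'":
--                 if nxt == "'":
--                     result.append(nxt)
--                     i += 2
--                     continue
--                 in_single = False
--             i += 1
--             continue
--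
--         if in_double:
--             result.append(ch)
--             if ch == '"':
--                 in_double = False
--             i += 1
--             continue
--
--         if ch == "'":
--             in_single = True
--             result.append(ch)
--             i += 1
--             continue
--
--         if ch == '"':
--             in_double = True
--             result.append(ch)
--             i += 1
--             continue
--
--         if ch == "-" and nxt == "-":
--             break
--
--         result.append(ch)
--         i += 1
--
--     return "".join(result)
-- ===== SOURCE B (Python) =====
-- def _strip_sql_line_comment(line: str) -> str:
--     """Remove -- comments while preserving quoted strings (region-level tokenizer)."""
--     out = []
--     i = 0
--     n = len(line)
--     while i < n:
--         ch = line[i]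
--         if ch == "'":
--             # consume the whole single-quoted region, honouring '' escapes
--             j = i + 1
--             while j < n:
--                 if line[j] == "'":
--                     if j + 1 < n and line[j + 1] == "'":
--                         j += 2
--                         continue
--                     j += 1
--                     break
--                 j += 1
--             out.append(line[i:j])
--             i = j
--         elif ch == '"':
--             # consume the whole double-quoted region
--             k = line.find('"', i + 1)
--             j = n if k == -1 else k + 1
--             out.append(line[i:j])
--             i = j
--         elif ch == "-" and line.startswith("--", i):
--             break
--         else:
--             # maximal run of plain characters
--             j = i + 1
--             while j < n and line[j] not in "'\"-":
--                 j += 1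
--             out.append(line[i:j])
--             i = j
--     return "".join(out)
-- ===== Notes on version B (the rewrite author's own statement) =====
-- stated objective: faster
-- what changed: Replaced A's per-character index loop carrying in_single/in_double Boolean state flags with a region-level tokenizer that per step consumes a whole single-quoted region (honouring '' escapes), a whole double-quoted region via str.find, a maximal run of plain characters, or stops at --; chunked slicing/str.find does the scanning in C instead of one Python iteration per character.
import Mathlib
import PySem

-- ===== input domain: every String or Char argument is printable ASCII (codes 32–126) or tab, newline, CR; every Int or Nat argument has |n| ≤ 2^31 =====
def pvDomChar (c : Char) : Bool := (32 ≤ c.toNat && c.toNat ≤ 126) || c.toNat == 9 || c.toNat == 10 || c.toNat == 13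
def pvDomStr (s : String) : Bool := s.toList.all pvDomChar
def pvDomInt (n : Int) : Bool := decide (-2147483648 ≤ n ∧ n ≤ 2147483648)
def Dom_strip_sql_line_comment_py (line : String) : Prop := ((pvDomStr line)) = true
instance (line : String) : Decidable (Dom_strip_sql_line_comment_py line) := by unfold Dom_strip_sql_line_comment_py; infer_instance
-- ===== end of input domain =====

-- B replaces A's per-character in_single/in_double flag state machine with a region-level
-- tokenizer (one whole quoted region or maximal plain run per outer step); objective: alternative.

-- ===== PORT A =====
-- A's index loop with its in_single/in_double Boolean flags, transcribed as recursion on the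
-- remaining characters carrying the same two flags ('nxt' lookahead = head of the rest;
-- the i += 2 continue of the '' escape is the two-character step in the first branch).
def stripAGo : List Char → Bool → Bool → List Char
  | [], _, _ => []
  | ch :: rest, inS, inD =>
    if inS then
      if ch = '\'' then
        match rest with
        | nxt :: rest2 =>
          if nxt = '\'' then ch :: nxt :: stripAGo rest2 true inD
          else ch :: stripAGo (nxt :: rest2) false inD
        | [] => ch :: stripAGo [] false inD
      else ch :: stripAGo rest true inD
    else if inD then
      if ch = '"' then ch :: stripAGo rest inS false
      else ch :: stripAGo rest inS true
    else if ch = '\'' then ch :: stripAGo rest true inD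
    else if ch = '"' then ch :: stripAGo rest inS true
    else if ch = '-' ∧ rest.head? = some '-' then []
    else ch :: stripAGo rest inS inD
termination_by l _ _ => l.length
decreasing_by all_goals (simp_all; try omega)

def strip_sql_line_comment_py (line : String) : String :=
  String.mk (stripAGo line.toList false false)

-- ===== PORT B =====
-- B's inner while loop locating the end of a single-quoted region (input = the characters after
-- the opening quote): returns (the region including the closing quote, the remainder).
def scanSingle : List Char → List Char × List Char
  | [] => ([], [])
  | c :: rest =>
    if c = '\'' then
      match rest with
      | nxt :: rest2 =>
        if nxt = '\'' then
          (c :: nxt :: (scanSingle rest2).1, (scanSingle rest2).2)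
        else ([c], nxt :: rest2)
      | [] => ([c], [])
    else
      (c :: (scanSingle rest).1, (scanSingle rest).2)

-- B's line.find('"', i + 1) plus slice: everything up to and including the closing double quote.
def scanDouble : List Char → List Char × List Char
  | [] => ([], [])
  | c :: rest =>
    if c = '"' then ([c], rest)
    else (c :: (scanDouble rest).1, (scanDouble rest).2)

-- B's maximal run of plain characters (stops before ', " or -).
def scanPlain : List Char → List Char × List Char
  | [] => ([], [])
  | c :: rest =>
    if c = '\'' ∨ c = '"' ∨ c = '-' then ([], c :: rest)
    else (c :: (scanPlain rest).1, (scanPlain rest).2)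

-- The scanners return a suffix of their input (cursor only moves forward): needed by
-- stripBGo's termination proof, cited there by name.
theorem scanSingle_snd_len : ∀ l : List Char, (scanSingle l).2.length ≤ l.length := by
  intro l
  induction l using scanSingle.induct
  case case1 => simp [scanSingle]
  case case2 => simp_all [scanSingle]; omega
  case case3 => simp_all [scanSingle]
  case case4 => simp [scanSingle]
  case case5 c rest h ih => rw [scanSingle.eq_def]; simp [h]; omega

theorem scanDouble_snd_len : ∀ l : List Char, (scanDouble l).2.length ≤ l.length := by
  intro l
  induction l using scanDouble.induct
  case case1 => simp [scanDouble]
  case case2 => simp_all [scanDouble]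
  case case3 c rest h ih => rw [scanDouble.eq_def]; simp [h]; omega

theorem scanPlain_snd_len : ∀ l : List Char, (scanPlain l).2.length ≤ l.length := by
  intro l
  induction l using scanPlain.induct
  case case1 => simp [scanPlain]
  case case2 => simp_all [scanPlain]
  case case3 c rest h ih => rw [scanPlain.eq_def]; simp [h]; omega

-- B's outer loop: one region or run per step, stop at a bare --.
def stripBGo : List Char → List Char
  | [] => []
  | c :: rest =>
    if c = '\'' then
      c :: (scanSingle rest).1 ++ stripBGo (scanSingle rest).2
    else if c = '"' then
      c :: (scanDouble rest).1 ++ stripBGo (scanDouble rest).2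
    else if c = '-' ∧ rest.head? = some '-' then []
    else
      c :: (scanPlain rest).1 ++ stripBGo (scanPlain rest).2
termination_by l => l.length
decreasing_by
  · exact Nat.lt_succ_of_le (scanSingle_snd_len rest)
  · exact Nat.lt_succ_of_le (scanDouble_snd_len rest)
  · exact Nat.lt_succ_of_le (scanPlain_snd_len rest)

def strip_sql_line_comment_py_alt (line : String) : String :=
  String.mk (stripBGo line.toList)

-- ===== PRECONDITION & SPEC =====
def Spec_strip_sql_line_comment_py (line : String) (out : String) : Prop := out = strip_sql_line_comment_py_alt line
instance (line : String) (out : String) : Decidable (Spec_strip_sql_line_comment_py line out) := by unfold Spec_strip_sql_line_comment_py; infer_instance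

-- ===== CLAIM (what is proved, stated in full; the proofs are below) =====
def Claim_equal_strip_sql_line_comment_py : Prop := ∀ (line : String), Dom_strip_sql_line_comment_py line → Spec_strip_sql_line_comment_py line (strip_sql_line_comment_py line)

-- ===== LEMMAS AND PROOFS =====

-- In state in_single, A consumes exactly the single-quoted region B's scanner finds,
-- then continues in the quiescent state.
theorem stripA_single : ∀ l : List Char,
    stripAGo l true false = (scanSingle l).1 ++ stripAGo (scanSingle l).2 false false := by
  intro l
  induction l using scanSingle.induct
  case case1 => simp [stripAGo, scanSingle]
  case case2 rest2 ih => rw [stripAGo.eq_def, scanSingle.eq_def]; simp [ih]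
  case case3 nxt rest2 h => rw [stripAGo.eq_def, scanSingle.eq_def]; simp [h]
  case case4 => rw [stripAGo.eq_def, scanSingle.eq_def]; simp
  case case5 c rest h ih => rw [stripAGo.eq_def, scanSingle.eq_def]; simp [h, ih]

-- In state in_double, A consumes exactly the double-quoted region B's scanner finds.
theorem stripA_double : ∀ l : List Char,
    stripAGo l false true = (scanDouble l).1 ++ stripAGo (scanDouble l).2 false false := by
  intro l
  induction l using scanDouble.induct
  case case1 => simp [stripAGo, scanDouble]
  case case2 rest => rw [stripAGo.eq_def, scanDouble.eq_def]; simp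
  case case3 c rest h ih => rw [stripAGo.eq_def, scanDouble.eq_def]; simp [h, ih]

-- In the quiescent state, A first copies exactly the plain run B's scanner finds.
theorem stripA_plain : ∀ l : List Char,
    stripAGo l false false = (scanPlain l).1 ++ stripAGo (scanPlain l).2 false false := by
  intro l
  induction l using scanPlain.induct
  case case1 => simp [stripAGo, scanPlain]
  case case2 c rest h => rw [scanPlain.eq_def]; simp [h]
  case case3 c rest h ih =>
    rw [not_or, not_or] at h
    obtain ⟨h1, h2, h3⟩ := h
    rw [stripAGo.eq_def, scanPlain.eq_def]
    simp [h1, h2, h3, ih]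

theorem stripA_eq_stripB : ∀ l : List Char, stripAGo l false false = stripBGo l := by
  intro l
  induction l using stripBGo.induct
  case case1 => simp [stripAGo, stripBGo]
  case case2 =>
    rename_i rest ih
    rw [stripBGo.eq_def, stripAGo.eq_def]
    simp_all [stripA_single]
  case case3 =>
    rename_i rest ih
    rw [stripBGo.eq_def, stripAGo.eq_def]
    simp_all [stripA_double]
  case case4 =>
    rw [stripBGo.eq_def, stripAGo.eq_def]
    simp_all
  case case5 =>
    rename_i c rest hs hd hc ih
    have hcc : ¬(c = '-' ∧ rest.head? = some '-') := hc
    rw [stripBGo.eq_def, stripAGo.eq_def]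
    simp [hs, hd, hcc, stripA_plain rest, ih]

-- ===== VERDICT (by name: the statement is the Claim_ definition above) =====
theorem strip_sql_line_comment_py_spec : Claim_equal_strip_sql_line_comment_py := by
  intro line _
  unfold Spec_strip_sql_line_comment_py strip_sql_line_comment_py strip_sql_line_comment_py_alt
  rw [stripA_eq_stripB]
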